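-- pv_equiv track=rewrite | github.com/shivanipuli/ArtificialIntelligence | Genetic Algorithm/tetris.py | place_block_on_row
-- ===== SOURCE A (Python) =====
-- def place_block_on_row(board,block,col,last_row):
--     if col+block.index("5")>10: #if it goes over the edge
--         return "GAME OVER"
--     #last_row=find_last_row(board,block,col)
--     ind=last_row*10+col
--     for l in block:
--         if last_row<0:
--             return "GAME OVER"
--         if l=="5": #next row
--             last_row-=1
--             ind=last_row*10+col
--         elif board[ind]=="#" and l=="#": #only case with clashing
--             return "GAME OVER"
--         else:
--             if l=="#":
--                 board=board[:ind]+"#"+board[ind+1:] #or "R"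
--             #print_board(board)
--             ind+=1
--     return board#eliminate_rows(board)
-- ===== SOURCE B (Python) =====
-- def place_block_on_row(board, block, col, last_row):
--     if col + block.index("5") > 10:  # goes over the edge
--         return "GAME OVER"
--     # Pass 1 (board-independent): parse the block into an ordered list of
--     # (index, is_hash) operations, applying the row checks as we scan.
--     ops = []
--     row = last_row
--     ind = row * 10 + col
--     for l in block:
--         if row < 0:
--             return "GAME OVER"
--         if l == "5":
--             row -= 1
--             ind = row * 10 + col
--         else:
--             ops.append((ind, l == "#"))
--             ind += 1
--     # Pass 2: apply the operations to a mutable copy of the board.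
--     cells = list(board)
--     for i, fill in ops:
--         if cells[i] == "#" and fill:
--             return "GAME OVER"
--         if fill:
--             cells[i] = "#"
--     return "".join(cells)
-- ===== Notes on version B (the rewrite author's own statement) =====
-- stated objective: alternative
-- what changed: B splits A's single collision-and-write loop into two passes: a board-independent parse of the block into an ordered (index, is_hash) operation list (doing the edge and row checks), then an apply pass over a mutable list copy of the board that does all board reads/writes. …
-- outside the precondition, e.g. on place_block_on_row('##...#.', '.5', -5, 1): A returns '##...#.', B returns '##...#.'
import Mathlib
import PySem

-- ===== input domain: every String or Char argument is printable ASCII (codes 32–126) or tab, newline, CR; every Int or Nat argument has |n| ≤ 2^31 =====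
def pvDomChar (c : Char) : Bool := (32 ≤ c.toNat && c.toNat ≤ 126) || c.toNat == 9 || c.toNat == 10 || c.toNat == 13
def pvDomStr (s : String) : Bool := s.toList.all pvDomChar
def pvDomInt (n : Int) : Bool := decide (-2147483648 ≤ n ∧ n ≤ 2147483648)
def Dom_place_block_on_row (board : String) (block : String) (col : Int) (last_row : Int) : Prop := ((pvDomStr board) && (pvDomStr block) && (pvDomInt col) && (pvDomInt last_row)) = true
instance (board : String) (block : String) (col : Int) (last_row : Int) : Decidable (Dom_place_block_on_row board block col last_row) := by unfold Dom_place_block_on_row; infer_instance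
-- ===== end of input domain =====

-- B replaces A's single interleaved loop by a board-independent parse of the block into an
-- ordered operation list followed by an apply pass over a list copy of the board (objective:
-- alternative decomposition; A mutates nothing, both are pure in their return value).

-- ===== PORT A =====
-- the for-loop of A: state is (board, last_row, ind); '' returned where Python raises IndexError (excluded by Pre_)
def pvA_loop (chars : List Char) (board : List Char) (last_row : Int) (ind : Int) (col : Int) : String :=
  match chars with
  | [] => String.ofList board
  | l :: rest =>
    if last_row < 0 then "GAME OVER"
    else if l = '5' then
      pvA_loop rest board (last_row - 1) ((last_row - 1) * 10 + col) col
    else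
      match PySem.List.pyGet? board ind with
      | none => ""   -- board[ind] raises IndexError in Python; outside Pre_
      | some c =>
        if c = '#' ∧ l = '#' then "GAME OVER"
        else if l = '#' then
          -- board = board[:ind] + "#" + board[ind+1:]
          pvA_loop rest
            (PySem.List.slice board none (some ind) ++ '#' :: PySem.List.slice board (some (ind + 1)) none)
            last_row (ind + 1) col
        else
          pvA_loop rest board last_row (ind + 1) col

def place_block_on_row (board : String) (block : String) (col : Int) (last_row : Int) : String :=
  match PySem.List.index? block.toList '5' with
  | none => ""   -- block.index("5") raises ValueError in Python; outside Pre_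
  | some i =>
    if 10 < col + (i : Int) then "GAME OVER"
    else pvA_loop block.toList board.toList last_row (last_row * 10 + col) col

-- ===== PORT B =====
-- pass 1 of B: parse the block into (index, is_hash) operations; none = GAME OVER during the scan
def pvB_parse (chars : List Char) (row : Int) (ind : Int) (col : Int) (ops : List (Int × Bool)) :
    Option (List (Int × Bool)) :=
  match chars with
  | [] => some ops
  | l :: rest =>
    if row < 0 then none
    else if l = '5' then pvB_parse rest (row - 1) ((row - 1) * 10 + col) col ops
    else pvB_parse rest row (ind + 1) col (ops ++ [(ind, l == '#')])

-- pass 2 of B: apply the operations to the cell list; none = GAME OVER (or, outside Pre_, IndexError)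
def pvB_apply (ops : List (Int × Bool)) (cells : List Char) : Option (List Char) :=
  match ops with
  | [] => some cells
  | (i, fill) :: rest =>
    match PySem.List.pyGet? cells i with
    | none => none   -- cells[i] raises IndexError in Python; outside Pre_
    | some c =>
      if c = '#' ∧ fill = true then none
      else pvB_apply rest (if fill then PySem.List.pySetD cells i '#' else cells)

def place_block_on_row_alt (board : String) (block : String) (col : Int) (last_row : Int) : String :=
  match PySem.List.index? block.toList '5' with
  | none => ""   -- block.index("5") raises ValueError; outside Pre_
  | some i =>
    if 10 < col + (i : Int) then "GAME OVER"
    else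
      match pvB_parse block.toList last_row (last_row * 10 + col) col [] with
      | none => "GAME OVER"
      | some ops =>
        match pvB_apply ops board.toList with
        | none => "GAME OVER"
        | some cells => String.ofList cells   -- "".join(cells)

-- ===== PRECONDITION & SPEC =====
-- shape measures of the block used by Pre_: count of leading '5' characters, and the length of
-- the block with its trailing '5' characters removed
def pvLead5 (l : List Char) : Nat := (l.takeWhile (· == '5')).length
def pvBody : List Char → Nat
  | [] => 0
  | x :: rest => if x = '5' ∧ rest.all (· == '5') then 0 else pvBody rest + 1

-- Pre_ excludes inputs whose block has no '5' (A raises ValueError) and, beyond the cases where A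
-- exits before touching the board (over the edge; the row counter runs out during the leading
-- '5's; a block of only '5's), requires simple shape bounds under which every board index A
-- touches is in range; outside them A may raise IndexError, may read via Python's negative-index
-- wraparound, or may happen to return GAME OVER on an early clash before reaching a bad index.
def Pre_place_block_on_row (board : String) (block : String) (col : Int) (last_row : Int) : Prop :=
  (PySem.List.index? block.toList '5').isSome = true ∧
    (10 < col + (((PySem.List.index? block.toList '5').getD 0 : Nat) : Int) ∨
     last_row < (pvLead5 block.toList : Int) ∨
     block.toList.all (· == '5') = true ∨
     ((0 ≤ col ∨ 0 ≤ (last_row - (block.toList.count '5' : Int)) * 10 + col) ∧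
      (last_row - (pvLead5 block.toList : Int)) * 10 + col +
          ((pvBody block.toList : Int) - (pvLead5 block.toList : Int)) ≤ (board.toList.length : Int)))
instance (board : String) (block : String) (col : Int) (last_row : Int) : Decidable (Pre_place_block_on_row board block col last_row) := by unfold Pre_place_block_on_row; infer_instance
def pvWitness_place_block_on_row : String × String × Int × Int := ("..........", "#5", 0, 0)

def Spec_place_block_on_row (board : String) (block : String) (col : Int) (last_row : Int) (out : String) : Prop := out = place_block_on_row_alt board block col last_row
instance (board : String) (block : String) (col : Int) (last_row : Int) (out : String) : Decidable (Spec_place_block_on_row board block col last_row out) := by unfold Spec_place_block_on_row; infer_instance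

-- ===== CLAIM (what is proved, stated in full; the proofs are below) =====
def Claim_equal_place_block_on_row : Prop := ∀ (board : String) (block : String) (col : Int) (last_row : Int), Dom_place_block_on_row board block col last_row → Pre_place_block_on_row board block col last_row → Spec_place_block_on_row board block col last_row (place_block_on_row board block col last_row)

-- ===== LEMMAS AND PROOFS =====

-- B's two passes glued together, from a given loop state (proof-side helper)
def pvRun (chars board : List Char) (row ind col : Int) : String :=
  match pvB_parse chars row ind col [] with
  | none => "GAME OVER"
  | some ops =>
    match pvB_apply ops board with
    | none => "GAME OVER"
    | some cells => String.ofList cells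

lemma pvB_parse_acc (chars : List Char) :
    ∀ (row ind col : Int) (ops : List (Int × Bool)),
      pvB_parse chars row ind col ops = (pvB_parse chars row ind col []).map (ops ++ ·) := by
  induction chars with
  | nil => intro row ind col ops; simp [pvB_parse]
  | cons l rest ih =>
    intro row ind col ops
    simp only [pvB_parse]
    split_ifs with h1 h2
    · rfl
    · exact ih _ _ _ _
    · rw [ih _ _ _ (ops ++ [(ind, l == '#')]), ih _ _ _ ([] ++ [(ind, l == '#')])]
      cases pvB_parse rest row (ind + 1) col [] <;> simp

lemma pvA_noRead (chars : List Char) :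
    ∀ (board : List Char) (row ind col : Int),
      (chars.all (· == '5') = true ∨ row < ((chars.takeWhile (· == '5')).length : Int)) →
      pvA_loop chars board row ind col = pvRun chars board row ind col := by
  induction chars with
  | nil => intros; simp [pvA_loop, pvRun, pvB_parse, pvB_apply]
  | cons l rest ih =>
    intro board row ind col h
    by_cases hneg : row < 0
    · simp [pvA_loop, pvRun, pvB_parse, hneg]
    · have h5 : l = '5' := by
        rcases h with h | h
        · simp [List.all_cons] at h; simpa using h.1
        · by_contra hne
          rw [List.takeWhile_cons_of_neg (by simpa using hne)] at h
          simp at h; omega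
      have h' : rest.all (· == '5') = true ∨ row - 1 < ((rest.takeWhile (· == '5')).length : Int) := by
        rcases h with h | h
        · left; simp only [List.all_cons, Bool.and_eq_true] at h; exact h.2
        · right
          rw [h5, List.takeWhile_cons_of_pos (by simp)] at h
          simp at h; omega
      have := ih board (row - 1) ((row - 1) * 10 + col) col h'
      simp [pvA_loop, pvRun, pvB_parse, hneg, h5] at this ⊢
      exact this

lemma pvA_loop_eq_pvRun (chars : List Char) :
    ∀ (board : List Char) (row ind col : Int),
      (0 ≤ col ∨ 0 ≤ (row - (chars.count '5' : Int)) * 10 + col) →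
      row * 10 + col ≤ ind →
      ind + (pvBody chars : Int) ≤ (board.length : Int) + 11 * ((chars.takeWhile (· == '5')).length : Int) →
      pvA_loop chars board row ind col = pvRun chars board row ind col := by
  induction chars with
  | nil => intro board row ind col _ _ _; simp [pvA_loop, pvRun, pvB_parse, pvB_apply]
  | cons l rest ih =>
    intro board row ind col hlow hlo hhi
    by_cases hneg : row < 0
    · simp [pvA_loop, pvRun, pvB_parse, hneg]
    · by_cases h5 : l = '5'
      · -- '5' : go to next row
        by_cases hall : rest.all (· == '5') = true
        · -- no board access ever happens in the rest
          have := pvA_noRead rest board (row - 1) ((row - 1) * 10 + col) col (Or.inl hall)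
          simp [pvA_loop, pvRun, pvB_parse, hneg, h5] at this ⊢
          exact this
        · have hbody : pvBody (l :: rest) = pvBody rest + 1 := by
            rw [pvBody, if_neg]; rintro ⟨-, hr⟩; exact hall hr
          have htake : ((l :: rest).takeWhile (· == '5')).length = (rest.takeWhile (· == '5')).length + 1 := by
            rw [h5, List.takeWhile_cons_of_pos (by simp)]; simp
          have hcnt : (l :: rest).count '5' = rest.count '5' + 1 := by
            rw [h5]; simp
          have := ih board (row - 1) ((row - 1) * 10 + col) col
            (by rcases hlow with h | h
                · exact Or.inl h
                · right; rw [hcnt] at h; push_cast at h ⊢; linarith)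
            le_rfl
            (by rw [hbody, htake] at hhi; push_cast at hhi ⊢; omega)
          simp [pvA_loop, pvRun, pvB_parse, hneg, h5] at this ⊢
          exact this
      · -- a cell of the block: board read happens, index in range
        have hbody : pvBody (l :: rest) = pvBody rest + 1 := by
          rw [pvBody, if_neg]; rintro ⟨hl, -⟩; exact h5 hl
        have htake : ((l :: rest).takeWhile (· == '5')).length = 0 := by
          rw [List.takeWhile_cons_of_neg (by simpa using h5)]; rfl
        have hcnt : (l :: rest).count '5' = rest.count '5' := by
          simp [h5]
        rw [hbody, htake] at hhi
        push_cast at hhi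
        have hind0 : 0 ≤ ind := by
          rcases hlow with h | h
          · nlinarith [hlo, not_lt.mp hneg]
          · rw [hcnt] at h; nlinarith [hlo, Int.natCast_nonneg (rest.count '5')]
        have hlt : ind < (board.length : Int) := by omega
        obtain ⟨n, hn⟩ : ∃ n : Nat, ind = (n : Int) := ⟨ind.toNat, (Int.toNat_of_nonneg hind0).symm⟩
        have hnlen : n < board.length := by exact_mod_cast hn ▸ hlt
        have hget : PySem.List.pyGet? board ind = some board[n] := by
          rw [hn, PySem.List.pyGet?_natCast, List.getElem?_eq_getElem hnlen]
        -- unfold one step on both sides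
        rw [show pvA_loop (l :: rest) board row ind col =
              (if board[n] = '#' ∧ l = '#' then "GAME OVER"
               else if l = '#' then
                 pvA_loop rest
                   (PySem.List.slice board none (some ind) ++ '#' :: PySem.List.slice board (some (ind + 1)) none)
                   row (ind + 1) col
               else pvA_loop rest board row (ind + 1) col) by
            simp [pvA_loop, hneg, h5, hget]]
        have hparse : pvB_parse (l :: rest) row ind col [] =
            (pvB_parse rest row (ind + 1) col []).map ((ind, l == '#') :: ·) := by
          simp only [pvB_parse, if_neg hneg, if_neg h5]
          rw [pvB_parse_acc rest row (ind + 1) col ([] ++ [(ind, l == '#')])]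
          simp
        have hrun : pvRun (l :: rest) board row ind col =
            (match (pvB_parse rest row (ind + 1) col []).map ((ind, l == '#') :: ·) with
             | none => "GAME OVER"
             | some ops =>
               match pvB_apply ops board with
               | none => "GAME OVER"
               | some cells => String.ofList cells) := by
          simp only [pvRun, hparse]
        -- the string write equals List.set
        have hset : PySem.List.slice board none (some ind) ++ '#' :: PySem.List.slice board (some (ind + 1)) none
              = board.set n '#' := by
          rw [hn]
          rw [show ((n : Int) + 1) = ((n + 1 : Nat) : Int) by push_cast; ring]
          rw [PySem.List.slice_to_natCast, PySem.List.slice_from_natCast]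
          simp [List.set_eq_take_append_cons_drop, hnlen]
        have hsetD : PySem.List.pySetD board ind '#' = board.set n '#' := by
          rw [hn]; simp
        by_cases hclash : board[n] = '#' ∧ l = '#'
        · rw [if_pos hclash, hrun]
          cases hp : pvB_parse rest row (ind + 1) col [] with
          | none => rfl
          | some ops =>
            simp only [Option.map_some]
            rw [show pvB_apply (((ind, l == '#')) :: ops) board = none by
              simp [pvB_apply, hget, hclash.1, hclash.2]]
        · rw [if_neg hclash]
          have hih : ∀ b' : List Char, b'.length = board.length →
              pvA_loop rest b' row (ind + 1) col = pvRun rest b' row (ind + 1) col := by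
            intro b' hb'
            refine ih b' row (ind + 1) col ?_ (by omega) (by rw [hb']; omega)
            rcases hlow with h | h
            · exact Or.inl h
            · right; rw [hcnt] at h; exact h
          by_cases hhash : l = '#'
          · have hc : ¬ board[n] = '#' := fun hc => hclash ⟨hc, hhash⟩
            rw [if_pos hhash, hset, hih (board.set n '#') (by simp), hrun]
            cases hp : pvB_parse rest row (ind + 1) col [] with
            | none => simp [pvRun, hp]
            | some ops =>
              simp only [Option.map_some]
              rw [show pvB_apply (((ind, l == '#')) :: ops) board = pvB_apply ops (board.set n '#') by
                simp [pvB_apply, hget, hhash, hc, hsetD]]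
              simp [pvRun, hp]
          · rw [if_neg hhash, hih board rfl, hrun]
            cases hp : pvB_parse rest row (ind + 1) col [] with
            | none => simp [pvRun, hp]
            | some ops =>
              simp only [Option.map_some]
              rw [show pvB_apply (((ind, l == '#')) :: ops) board = pvB_apply ops board by
                simp [pvB_apply, hget, hhash]]
              simp [pvRun, hp]

-- ===== VERDICT (by name: the statement is the Claim_ definition above) =====
theorem place_block_on_row_spec : Claim_equal_place_block_on_row := by
  intro board block col last_row _ hpre
  obtain ⟨hsome, hdisj⟩ := hpre
  obtain ⟨i, hi⟩ := Option.isSome_iff_exists.mp hsome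
  unfold Spec_place_block_on_row place_block_on_row place_block_on_row_alt
  rw [hi]
  simp only [hi, Option.getD_some] at hdisj
  by_cases hedge : 10 < col + (i : Int)
  · simp [hedge]
  · simp only [if_neg hedge]
    have hrun : pvA_loop block.toList board.toList last_row (last_row * 10 + col) col
        = pvRun block.toList board.toList last_row (last_row * 10 + col) col := by
      rcases hdisj with h1 | h2 | h3 | ⟨h4, h5⟩
      · exact absurd h1 hedge
      · exact pvA_noRead block.toList board.toList last_row (last_row * 10 + col) col
          (Or.inr (by unfold pvLead5 at h2; exact h2))
      · exact pvA_noRead block.toList board.toList last_row (last_row * 10 + col) col (Or.inl h3)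
      · refine pvA_loop_eq_pvRun block.toList board.toList last_row (last_row * 10 + col) col h4 le_rfl ?_
        unfold pvLead5 at h5
        omega
    rw [hrun]; rfl
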